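-- pv_equiv track=rewrite | github.com/ali4006/HCP-reproducibility-paper | bin/code/regions.py | sort_func
-- ===== SOURCE A (Python) =====
-- prefixes = [ 'left', 'right', 'inf', 'lat', 'lateral', '3rd', '4th', 'non' ]
--
-- def sort_func(x):
--     x = x.lower()
--     def prefixed(s):
--         for x in prefixes:
--             if s.startswith(x):
--                 return True
--         return False
--     while(prefixed(x)):
--         s = x.split(' ')
--         x = ' '.join(s[1:])
--     return x
-- ===== SOURCE B (Python) =====
-- prefixes = [ 'left', 'right', 'inf', 'lat', 'lateral', '3rd', '4th', 'non' ]
--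
-- def sort_func(x):
--     words = x.lower().split(' ')
--     i = 0
--     while i < len(words) and any(words[i].startswith(p) for p in prefixes):
--         i += 1
--     return ' '.join(words[i:])
-- ===== Notes on version B (the rewrite author's own statement) =====
-- stated objective: simpler
-- what changed: B splits the lowercased string once and drops leading prefixed words with a single index scan, then joins the tail, instead of A's while-loop that re-splits and re-joins the whole string on every dropped word.
import Mathlib
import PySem

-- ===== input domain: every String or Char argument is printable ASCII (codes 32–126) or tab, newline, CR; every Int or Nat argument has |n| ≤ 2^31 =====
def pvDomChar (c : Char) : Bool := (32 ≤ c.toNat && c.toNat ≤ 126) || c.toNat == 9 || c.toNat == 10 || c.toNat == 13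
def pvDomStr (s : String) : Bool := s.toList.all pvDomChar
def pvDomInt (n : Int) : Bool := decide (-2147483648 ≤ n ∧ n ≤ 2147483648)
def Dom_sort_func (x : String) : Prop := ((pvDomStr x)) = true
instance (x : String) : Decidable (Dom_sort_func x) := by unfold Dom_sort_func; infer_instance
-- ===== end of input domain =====

-- B splits the lowercased string once and drops leading prefixed words with a single scan,
-- then joins the tail, instead of A's while-loop that re-splits and re-joins the whole
-- string on every dropped word (objective: simpler).

-- ===== PORT A =====
-- module constant 'prefixes'
def pv_prefixes : List (List Char) :=
  [['l','e','f','t'], ['r','i','g','h','t'], ['i','n','f'], ['l','a','t'],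
   ['l','a','t','e','r','a','l'], ['3','r','d'], ['4','t','h'], ['n','o','n']]

-- A's inner 'prefixed': a for-loop with early 'return True' = any
def prefixedA (s : List Char) : Bool := pv_prefixes.any (fun p => PySem.Chars.startswith s p)

-- Termination helpers for loopA's while-loop (cited by name in decreasing_by; wsplit is the
-- proof-side characterisation of x.split(' ') for the single-char separator).
def wsplit : List Char → List (List Char)
  | [] => [[]]
  | c :: t =>
      if c = ' ' then [] :: wsplit t
      else match wsplit t with
        | [] => [[c]]          -- unreachable: wsplit never returns []
        | h :: r => (c :: h) :: r

lemma wsplit_ne_nil (x : List Char) : wsplit x ≠ [] := by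
  match x with
  | [] => simp [wsplit]
  | c :: t =>
    simp only [wsplit]
    split
    · simp
    · split <;> simp

lemma join_cons_head (c : Char) (h : List Char) (r : List (List Char)) :
    PySem.Chars.join [' '] ((c :: h) :: r) = c :: PySem.Chars.join [' '] (h :: r) := by
  cases r with
  | nil => simp [PySem.Chars.join_singleton]
  | cons b s => simp [PySem.Chars.join_cons_cons]

lemma join_wsplit (x : List Char) : PySem.Chars.join [' '] (wsplit x) = x := by
  induction x with
  | nil => simp [wsplit, PySem.Chars.join_singleton]
  | cons c t ih =>
    by_cases hc : c = ' '
    · subst hc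
      cases hr : wsplit t with
      | nil => exact absurd hr (wsplit_ne_nil t)
      | cons h r =>
        rw [hr] at ih
        simp only [wsplit, if_true, hr]
        rw [PySem.Chars.join_cons_cons]
        simp [ih]
    · cases hr : wsplit t with
      | nil => exact absurd hr (wsplit_ne_nil t)
      | cons h r =>
        rw [hr] at ih
        simp only [wsplit, if_neg hc, hr]
        rw [join_cons_head, ih]

lemma splitOn_go_space (fuel : Nat) (l cur : List Char) (acc : List (List Char))
    (hf : l.length < fuel) :
    PySem.Chars.splitOn.go [' '] fuel l cur acc =
      acc.reverse ++ (match wsplit l with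
        | [] => []
        | h :: r => (cur.reverse ++ h) :: r) := by
  induction fuel generalizing l cur acc with
  | zero => omega
  | succ f ih =>
    cases l with
    | nil => simp [PySem.Chars.splitOn.go, wsplit]
    | cons c rest =>
      by_cases hc : c = ' '
      · subst hc
        have hpre : List.isPrefixOf [' '] (' ' :: rest) = true := by simp [List.isPrefixOf]
        rw [PySem.Chars.splitOn.go]
        simp only [hpre, if_true]
        have hdrop : List.drop [' '].length (' ' :: rest) = rest := by simp
        rw [hdrop, ih rest [] (cur.reverse :: acc) (by simpa using Nat.lt_of_succ_lt_succ hf)]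
        cases hr : wsplit rest with
        | nil => exact absurd hr (wsplit_ne_nil rest)
        | cons h r =>
          simp [wsplit, hr]
      · have hpre : List.isPrefixOf [' '] (c :: rest) = false := by
          simp [List.isPrefixOf]; exact fun h => hc h.symm
        rw [PySem.Chars.splitOn.go]
        simp only [hpre, Bool.false_eq_true, if_false]
        rw [ih rest (c :: cur) acc (by simpa using Nat.lt_of_succ_lt_succ hf)]
        cases hr : wsplit rest with
        | nil => exact absurd hr (wsplit_ne_nil rest)
        | cons h r =>
          simp [wsplit, hr, if_neg hc]

lemma splitOn_space (x : List Char) : PySem.Chars.splitOn x [' '] = wsplit x := by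
  rw [PySem.Chars.splitOn, splitOn_go_space (x.length + 1) x [] [] (by omega)]
  cases hr : wsplit x with
  | nil => exact absurd hr (wsplit_ne_nil x)
  | cons h r => simp

lemma prefixedA_nil : prefixedA [] = false := by decide

lemma loopA_dec (x : List Char) (h : prefixedA x = true) :
    (PySem.Chars.join [' '] (PySem.List.slice (PySem.Chars.splitOn x [' ']) (some 1) none)).length < x.length := by
  have hx : x ≠ [] := by rintro rfl; rw [prefixedA_nil] at h; cases h
  rw [splitOn_space]
  cases hr : wsplit x with
  | nil => exact absurd hr (wsplit_ne_nil x)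
  | cons w r =>
    have hslice : PySem.List.slice (w :: r) (some 1) none = r := by
      simp [PySem.List.slice_from]
    rw [hslice]
    have hx' : PySem.Chars.join [' '] (w :: r) = x := by rw [← hr, join_wsplit]
    cases r with
    | nil =>
      rw [PySem.Chars.join_nil]
      simp only [List.length_nil]
      exact List.length_pos_of_ne_nil hx
    | cons b s =>
      rw [PySem.Chars.join_cons_cons] at hx'
      have := congrArg List.length hx'
      simp at this
      omega

-- A's while loop: while prefixed(x): x = ' '.join(x.split(' ')[1:])
def loopA (x : List Char) : List Char :=
  if h : prefixedA x = true then
    loopA (PySem.Chars.join [' '] (PySem.List.slice (PySem.Chars.splitOn x [' ']) (some 1) none))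
  else x
termination_by x.length
decreasing_by exact loopA_dec x h

def sort_func (x : String) : String :=
  String.ofList (loopA (PySem.Chars.lower x.toList))

-- ===== PORT B =====
-- B's per-word check: any(words[i].startswith(p) for p in prefixes)
def startsAnyB (w : List Char) : Bool := pv_prefixes.any (fun p => PySem.Chars.startswith w p)

-- B's index loop: advance i past leading prefixed words; the result is words[i:]
def skipPrefixed : List (List Char) → List (List Char)
  | [] => []
  | w :: r => if startsAnyB w then skipPrefixed r else w :: r

def sort_func_alt (x : String) : String :=
  String.ofList (PySem.Chars.join [' ']
    (skipPrefixed (PySem.Chars.splitOn (PySem.Chars.lower x.toList) [' '])))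

-- ===== PRECONDITION & SPEC =====
def Spec_sort_func (x : String) (out : String) : Prop := out = sort_func_alt x
instance (x : String) (out : String) : Decidable (Spec_sort_func x out) := by unfold Spec_sort_func; infer_instance

-- ===== CLAIM (what is proved, stated in full; the proofs are below) =====
def Claim_equal_sort_func : Prop := ∀ (x : String), Dom_sort_func x → Spec_sort_func x (sort_func x)

-- ===== LEMMAS AND PROOFS =====

lemma wsplit_no_space (x : List Char) : ∀ w ∈ wsplit x, ' ' ∉ w := by
  induction x with
  | nil => simp [wsplit]
  | cons c t ih =>
    by_cases hc : c = ' '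
    · subst hc
      intro w hw
      simp only [wsplit, if_true, List.mem_cons] at hw
      rcases hw with rfl | hw
      · simp
      · exact ih w hw
    · cases hr : wsplit t with
      | nil => exact absurd hr (wsplit_ne_nil t)
      | cons h r =>
        intro w hw
        simp only [wsplit, if_neg hc, hr, List.mem_cons] at hw
        rcases hw with rfl | hw
        · have hh := ih h (by rw [hr]; exact List.mem_cons_self)
          intro hmem
          rcases List.mem_cons.mp hmem with h1 | h1
          · exact hc h1.symm
          · exact hh h1
        · exact ih w (by rw [hr]; exact List.mem_cons_of_mem _ hw)

lemma wsplit_of_no_space (w : List Char) (hw : ' ' ∉ w) : wsplit w = [w] := by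
  induction w with
  | nil => rfl
  | cons c t ih =>
    have hc : c ≠ ' ' := fun h => hw (by simp [h])
    have ht := ih (fun h => hw (List.mem_cons_of_mem _ h))
    simp [wsplit, hc, ht]

lemma wsplit_append_space (w t : List Char) (hw : ' ' ∉ w) :
    wsplit (w ++ ' ' :: t) = w :: wsplit t := by
  induction w with
  | nil => simp [wsplit]
  | cons c w' ih =>
    have hc : c ≠ ' ' := fun h => hw (by simp [h])
    have := ih (fun h => hw (List.mem_cons_of_mem _ h))
    simp only [List.cons_append, wsplit, if_neg hc, this]

lemma wsplit_join (ws : List (List Char)) (h : ws ≠ []) (hs : ∀ w ∈ ws, ' ' ∉ w) :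
    wsplit (PySem.Chars.join [' '] ws) = ws := by
  induction ws with
  | nil => simp at h
  | cons w r ih =>
    cases r with
    | nil =>
      rw [PySem.Chars.join_singleton]
      exact wsplit_of_no_space w (hs w List.mem_cons_self)
    | cons b s =>
      rw [PySem.Chars.join_cons_cons]
      have hjoin : w ++ [' '] ++ PySem.Chars.join [' '] (b :: s)
          = w ++ ' ' :: PySem.Chars.join [' '] (b :: s) := by simp
      rw [hjoin, wsplit_append_space _ _ (hs w List.mem_cons_self)]
      rw [ih (by simp) (fun v hv => hs v (List.mem_cons_of_mem _ hv))]

lemma isPrefixOf_append_space (p w t : List Char) (hp : ' ' ∉ p) :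
    p.isPrefixOf (w ++ ' ' :: t) = p.isPrefixOf w := by
  induction p generalizing w with
  | nil => simp [List.isPrefixOf]
  | cons a p' ih =>
    cases w with
    | nil =>
      have ha : a ≠ ' ' := fun h => hp (by simp [h])
      simp [List.isPrefixOf]
      exact fun h => absurd h ha
    | cons b w' =>
      simp only [List.cons_append, List.isPrefixOf]
      rw [ih w' (fun h => hp (List.mem_cons_of_mem _ h))]

lemma prefixedA_append_space (w t : List Char) :
    prefixedA (w ++ ' ' :: t) = prefixedA w := by
  have hps : ∀ p ∈ pv_prefixes, ' ' ∉ p := by decide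
  simp only [prefixedA, PySem.Chars.startswith]
  have : ∀ (l : List (List Char)), (∀ p ∈ l, ' ' ∉ p) →
      (l.any fun p => p.isPrefixOf (w ++ ' ' :: t)) = l.any fun p => p.isPrefixOf w := by
    intro l hl
    induction l with
    | nil => rfl
    | cons a l' ih =>
      simp only [List.any_cons, isPrefixOf_append_space a w t (hl a List.mem_cons_self),
        ih (fun p hp => hl p (List.mem_cons_of_mem _ hp))]
  exact this pv_prefixes hps

lemma loopA_join (ws : List (List Char)) (h : ws ≠ []) (hs : ∀ w ∈ ws, ' ' ∉ w) :
    loopA (PySem.Chars.join [' '] ws) = PySem.Chars.join [' '] (skipPrefixed ws) := by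
  induction ws with
  | nil => simp at h
  | cons w r ih =>
    cases r with
    | nil =>
      rw [PySem.Chars.join_singleton]
      by_cases hw : prefixedA w = true
      · rw [loopA, dif_pos hw, splitOn_space, wsplit_of_no_space w (hs w List.mem_cons_self)]
        have hslice : PySem.List.slice [w] (some 1) none = ([] : List (List Char)) := by
          simp [PySem.List.slice_from]
        rw [hslice, PySem.Chars.join_nil, loopA, dif_neg (by rw [prefixedA_nil]; simp)]
        have hb : startsAnyB w = true := by simpa [prefixedA, startsAnyB] using hw
        simp [skipPrefixed, hb, PySem.Chars.join_nil]
      · rw [loopA, dif_neg hw]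
        have : startsAnyB w = false := by simpa [prefixedA, startsAnyB] using hw
        simp [skipPrefixed, this, PySem.Chars.join_singleton]
    | cons b s =>
      rw [PySem.Chars.join_cons_cons]
      have hjoin : w ++ [' '] ++ PySem.Chars.join [' '] (b :: s)
          = w ++ ' ' :: PySem.Chars.join [' '] (b :: s) := by simp
      rw [hjoin]
      by_cases hw : prefixedA w = true
      · rw [loopA, dif_pos (by rw [prefixedA_append_space]; exact hw)]
        rw [splitOn_space, wsplit_append_space _ _ (hs w List.mem_cons_self),
          wsplit_join (b :: s) (by simp) (fun v hv => hs v (List.mem_cons_of_mem _ hv))]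
        have hslice : PySem.List.slice (w :: b :: s) (some 1) none = b :: s := by
          simp [PySem.List.slice_from]
        rw [hslice, ih (by simp) (fun v hv => hs v (List.mem_cons_of_mem _ hv))]
        have : startsAnyB w = true := by simpa [prefixedA, startsAnyB] using hw
        simp [skipPrefixed, this]
      · rw [loopA, dif_neg (by rw [prefixedA_append_space]; exact hw)]
        have : startsAnyB w = false := by simpa [prefixedA, startsAnyB] using hw
        rw [show skipPrefixed (w :: b :: s) = w :: b :: s by simp [skipPrefixed, this]]
        rw [PySem.Chars.join_cons_cons, hjoin]

-- ===== VERDICT (by name: the statement is the Claim_ definition above) =====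
theorem sort_func_spec : Claim_equal_sort_func := by
  intro x _
  unfold Spec_sort_func sort_func sort_func_alt
  set y := PySem.Chars.lower x.toList with hy
  have h1 : loopA y = PySem.Chars.join [' '] (skipPrefixed (wsplit y)) := by
    conv_lhs => rw [← join_wsplit y]
    exact loopA_join (wsplit y) (wsplit_ne_nil y) (wsplit_no_space y)
  rw [splitOn_space, h1]
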